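-- pv_equiv track=rewrite | github.com/nkzarrabi/Code-Exercises | music2.py | parse_text_to_notes_modular
-- ===== SOURCE A (Python) =====
-- def parse_text_to_notes_modular(text, scale, rhythm_pattern):
--     # Mapping of characters to scale degrees using modular arithmetic
--     def char_to_scale_degree(char):
--         return ord(char.lower()) % len(scale)
--
--     # Mapping count of non-note chars to a rhythm value
--     def count_to_rhythm(count):
--         return rhythm_pattern[count % len(rhythm_pattern)]
--
--     # Initialize an empty list to hold note and rest information
--     notes_sequence = []
--
--     # Track the count of consecutive non-note letters (for rests)
--     non_note_count = 0
--
--     # Iterate through each character in the text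
--     for char in text:
--         # Check if the character is a note
--         if char.isalpha():
--             # If there were non-note characters before this, add a rest
--             if non_note_count > 0:
--                 rhythm_value = count_to_rhythm(non_note_count)
--                 notes_sequence.append({'type': 'rest', 'duration': rhythm_value})
--                 non_note_count = 0  # Reset the non-note counter
--
--             # Map the character to a scale degree and then to a pitch
--             degree = char_to_scale_degree(char)
--             pitch = scale[degree]
--             notes_sequence.append({'type': 'note', 'pitch': pitch, 'duration': 'quarter'})  # Assuming quarter note for simplicity
--         else:
--             # If it's not a note, increment the non-note counter
--             non_note_count += 1
--
--     # Check if the text ended with non-note characters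
--     if non_note_count > 0:
--         rhythm_value = count_to_rhythm(non_note_count)
--         notes_sequence.append({'type': 'rest', 'duration': rhythm_value})
--
--     return notes_sequence
-- ===== SOURCE B (Python) =====
-- def parse_text_to_notes_modular(text, scale, rhythm_pattern):
--     # Run-based reformulation: scan maximal runs of alpha / non-alpha characters,
--     # emitting one note per alpha char and one rest per non-alpha run.
--     def note(c):
--         return {'type': 'note', 'pitch': scale[ord(c.lower()) % len(scale)], 'duration': 'quarter'}
--
--     out = []
--     i, n = 0, len(text)
--     while i < n:
--         j = i + 1
--         if text[i].isalpha():
--             out.append(note(text[i]))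
--             while j < n and text[j].isalpha():
--                 out.append(note(text[j]))
--                 j += 1
--         else:
--             while j < n and not text[j].isalpha():
--                 j += 1
--             out.append({'type': 'rest', 'duration': rhythm_pattern[(j - i) % len(rhythm_pattern)]})
--         i = j
--     return out
-- ===== Notes on version B (the rewrite author's own statement) =====
-- stated objective: alternative
-- what changed: Replaced A's stateful loop with a non-note counter and flush-before-note/at-end logic by an explicit scan over maximal alphabetic / non-alphabetic runs, emitting one note per alpha character and one rest per non-alpha run.
import Mathlib
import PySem

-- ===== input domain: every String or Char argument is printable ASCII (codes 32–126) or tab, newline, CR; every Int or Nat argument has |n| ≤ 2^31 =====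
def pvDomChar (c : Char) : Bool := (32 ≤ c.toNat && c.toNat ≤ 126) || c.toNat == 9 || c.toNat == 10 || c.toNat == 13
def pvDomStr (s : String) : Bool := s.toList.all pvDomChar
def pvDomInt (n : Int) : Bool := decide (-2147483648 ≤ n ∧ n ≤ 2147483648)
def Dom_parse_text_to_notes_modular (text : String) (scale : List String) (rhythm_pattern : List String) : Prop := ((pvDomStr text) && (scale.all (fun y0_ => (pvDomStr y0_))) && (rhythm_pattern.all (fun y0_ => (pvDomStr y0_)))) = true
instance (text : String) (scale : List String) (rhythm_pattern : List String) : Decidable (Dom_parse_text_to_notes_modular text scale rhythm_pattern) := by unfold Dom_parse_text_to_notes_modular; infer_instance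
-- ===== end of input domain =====

-- B replaces A's stateful non-note counter/flush loop by an explicit scan over maximal
-- alpha / non-alpha runs (objective: alternative decomposition, same cost).

-- ===== PORT A =====
-- char_to_scale_degree(char): ord(char.lower()) % len(scale)
def pvDegreeA (scale : List String) (c : Char) : Int :=
  PySem.Int.mod ((PySem.Chars.lowerChar c).toNat : Int) (scale.length : Int)

-- count_to_rhythm(count): rhythm_pattern[count % len(rhythm_pattern)]
-- (pyGet?/getD: Python raises on empty lists there; Pre_ excludes exactly those inputs)
def pvRhythmA (rhythm_pattern : List String) (n : Int) : String :=
  (PySem.List.pyGet? rhythm_pattern (PySem.Int.mod n (rhythm_pattern.length : Int))).getD ""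

-- the for-loop, state = (non_note_count, notes_sequence)
def pvLoopA (scale rhythm_pattern : List String) :
    List Char → Int → List (List (String × String)) → List (List (String × String))
  | [], n, acc =>
      if n > 0 then acc ++ [[("type", "rest"), ("duration", pvRhythmA rhythm_pattern n)]] else acc
  | c :: cs, n, acc =>
      if PySem.Chars.isalpha c then
        pvLoopA scale rhythm_pattern cs 0
          ((if n > 0 then acc ++ [[("type", "rest"), ("duration", pvRhythmA rhythm_pattern n)]] else acc)
            ++ [[("type", "note"),
                 ("pitch", (PySem.List.pyGet? scale (pvDegreeA scale c)).getD ""),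
                 ("duration", "quarter")]])
      else
        pvLoopA scale rhythm_pattern cs (n + 1) acc

def parse_text_to_notes_modular (text : String) (scale : List String) (rhythm_pattern : List String) : List (List (String × String)) :=
  pvLoopA scale rhythm_pattern text.toList 0 []

-- ===== PORT B =====
-- note(c)
def pvNoteB (scale : List String) (c : Char) : List (String × String) :=
  [("type", "note"),
   ("pitch", (PySem.List.pyGet? scale
      (PySem.Int.mod ((PySem.Chars.lowerChar c).toNat : Int) (scale.length : Int))).getD ""),
   ("duration", "quarter")]

def pvRestB (rhythm_pattern : List String) (k : Int) : List (String × String) :=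
  [("type", "rest"),
   ("duration", (PySem.List.pyGet? rhythm_pattern (PySem.Int.mod k (rhythm_pattern.length : Int))).getD "")]

-- the outer while loop: each step consumes one maximal run starting at the head
def pvLoopB (scale rhythm_pattern : List String) : List Char → List (List (String × String))
  | [] => []
  | c :: cs =>
      if PySem.Chars.isalpha c then
        pvNoteB scale c :: ((cs.takeWhile PySem.Chars.isalpha).map (pvNoteB scale)
          ++ pvLoopB scale rhythm_pattern (cs.dropWhile PySem.Chars.isalpha))
      else
        pvRestB rhythm_pattern ((1 + (cs.takeWhile (fun d => !PySem.Chars.isalpha d)).length : Nat) : Int)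
          :: pvLoopB scale rhythm_pattern (cs.dropWhile (fun d => !PySem.Chars.isalpha d))
  termination_by l => l.length
  decreasing_by
  · exact Nat.lt_succ_of_le (List.length_dropWhile_le _ _)
  · exact Nat.lt_succ_of_le (List.length_dropWhile_le _ _)

def parse_text_to_notes_modular_alt (text : String) (scale : List String) (rhythm_pattern : List String) : List (List (String × String)) :=
  pvLoopB scale rhythm_pattern text.toList

-- ===== PRECONDITION & SPEC =====
-- Pre_ excludes exactly the inputs where Python A raises ZeroDivisionError/IndexError:
-- an alphabetic character with an empty scale, or a non-alphabetic character with an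
-- empty rhythm_pattern.
def Pre_parse_text_to_notes_modular (text : String) (scale : List String) (rhythm_pattern : List String) : Prop :=
  (text.toList.any (fun c => PySem.Chars.isalpha c) = true → scale ≠ []) ∧
  (text.toList.any (fun c => !PySem.Chars.isalpha c) = true → rhythm_pattern ≠ [])

instance (text : String) (scale : List String) (rhythm_pattern : List String) : Decidable (Pre_parse_text_to_notes_modular text scale rhythm_pattern) := by
  unfold Pre_parse_text_to_notes_modular; infer_instance

def pvWitness_parse_text_to_notes_modular : String × List String × List String :=
  ("a.", ["C", "D"], ["quarter"])

def Spec_parse_text_to_notes_modular (text : String) (scale : List String) (rhythm_pattern : List String) (out : List (List (String × String))) : Prop := out = parse_text_to_notes_modular_alt text scale rhythm_pattern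
instance (text : String) (scale : List String) (rhythm_pattern : List String) (out : List (List (String × String))) : Decidable (Spec_parse_text_to_notes_modular text scale rhythm_pattern out) := by unfold Spec_parse_text_to_notes_modular; infer_instance

-- ===== CLAIM (what is proved, stated in full; the proofs are below) =====
def Claim_equal_parse_text_to_notes_modular : Prop := ∀ (text : String) (scale : List String) (rhythm_pattern : List String), Dom_parse_text_to_notes_modular text scale rhythm_pattern → Pre_parse_text_to_notes_modular text scale rhythm_pattern → Spec_parse_text_to_notes_modular text scale rhythm_pattern (parse_text_to_notes_modular text scale rhythm_pattern)

-- ===== LEMMAS AND PROOFS =====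

-- A's loop as a pure function of the remaining characters and the pending counter
def pvFA (scale rhythm_pattern : List String) : List Char → Int → List (List (String × String))
  | [], n => if n > 0 then [[("type", "rest"), ("duration", pvRhythmA rhythm_pattern n)]] else []
  | c :: cs, n =>
      if PySem.Chars.isalpha c then
        (if n > 0 then [[("type", "rest"), ("duration", pvRhythmA rhythm_pattern n)]] else [])
          ++ [("type", "note"),
              ("pitch", (PySem.List.pyGet? scale (pvDegreeA scale c)).getD ""),
              ("duration", "quarter")] :: pvFA scale rhythm_pattern cs 0
      else pvFA scale rhythm_pattern cs (n + 1)

theorem pvLoopA_eq_fA (scale rhythm_pattern : List String) (cs : List Char) :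
    ∀ (n : Int) (acc : List (List (String × String))),
      pvLoopA scale rhythm_pattern cs n acc = acc ++ pvFA scale rhythm_pattern cs n := by
  induction cs with
  | nil => intro n acc; simp [pvLoopA, pvFA]; split <;> simp
  | cons c cs ih =>
      intro n acc
      simp only [pvLoopA, pvFA]
      split
      · rw [ih]; split <;> simp
      · exact ih _ _

theorem pvLoopB_run (scale rhythm_pattern : List String) (cs : List Char) :
    pvLoopB scale rhythm_pattern cs =
      (cs.takeWhile PySem.Chars.isalpha).map (pvNoteB scale)
        ++ pvLoopB scale rhythm_pattern (cs.dropWhile PySem.Chars.isalpha) := by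
  cases cs with
  | nil => simp
  | cons c cs =>
      by_cases h : PySem.Chars.isalpha c
      · rw [pvLoopB]; simp [h]
      · simp [h]

theorem pvLoopB_cons_alpha (scale rhythm_pattern : List String) (c : Char) (cs : List Char)
    (h : PySem.Chars.isalpha c = true) :
    pvLoopB scale rhythm_pattern (c :: cs) = pvNoteB scale c :: pvLoopB scale rhythm_pattern cs := by
  rw [pvLoopB, pvLoopB_run scale rhythm_pattern cs]
  simp [h]

theorem pvFA_eq_loopB (scale rhythm_pattern : List String) (cs : List Char) :
    (pvFA scale rhythm_pattern cs 0 = pvLoopB scale rhythm_pattern cs) ∧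
    (∀ n : Int, 0 < n →
      pvFA scale rhythm_pattern cs n =
        pvRestB rhythm_pattern (n + ((cs.takeWhile (fun d => !PySem.Chars.isalpha d)).length : Int))
          :: pvLoopB scale rhythm_pattern (cs.dropWhile (fun d => !PySem.Chars.isalpha d))) := by
  induction cs with
  | nil =>
      constructor
      · simp [pvFA, pvLoopB]
      · intro n hn; simp [pvFA, pvLoopB, pvRestB, pvRhythmA, hn]
  | cons c cs ih =>
      by_cases h : PySem.Chars.isalpha c = true
      · constructor
        · rw [pvLoopB_cons_alpha scale rhythm_pattern c cs h]
          simp only [pvFA, h, if_true]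
          rw [ih.1]
          simp [pvNoteB, pvDegreeA]
        · intro n hn
          simp only [pvFA, h, if_true, if_pos hn]
          rw [ih.1, List.takeWhile_cons, List.dropWhile_cons]
          simp only [h, Bool.not_true, Bool.false_eq_true, if_false]
          rw [pvLoopB_cons_alpha scale rhythm_pattern c cs h]
          simp [pvNoteB, pvDegreeA, pvRestB, pvRhythmA]
      · have hlen : ∀ k : Nat, ((1 + k : Nat) : Int) = 1 + (k : Int) := by intro k; push_cast; ring
        constructor
        · simp only [pvFA, h, Bool.false_eq_true, if_false]
          have h0 : pvFA scale rhythm_pattern cs (0 + 1) = pvFA scale rhythm_pattern cs 1 := by norm_num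
          rw [h0, ih.2 1 one_pos, pvLoopB]
          simp only [h, Bool.false_eq_true, if_false]
          rw [hlen]
        · intro n hn
          simp only [pvFA, h, Bool.false_eq_true, if_false]
          rw [ih.2 (n + 1) (by omega)]
          simp only [List.takeWhile, List.dropWhile, h, Bool.not_false]
          congr 2
          simp only [List.length_cons]
          omega

-- ===== VERDICT (by name: the statement is the Claim_ definition above) =====
theorem parse_text_to_notes_modular_spec : Claim_equal_parse_text_to_notes_modular := by
  intro text scale rhythm_pattern _ _
  unfold Spec_parse_text_to_notes_modular parse_text_to_notes_modular parse_text_to_notes_modular_alt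
  rw [pvLoopA_eq_fA, (pvFA_eq_loopB scale rhythm_pattern text.toList).1]
  simp
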